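-- pv_equiv track=rewrite | github.com/gistable/gistable | dockerized-gists/3bc837bc3464019f8d97/snippet.py | string_splosion
-- ===== SOURCE A (Python) =====
-- def string_splosion(str):
--   s = ""
--   limit = len(str)
--   n = 1
--   while n <= limit:
--     s += str[0:n]
--     n = n + 1
--   return s
-- ===== SOURCE B (Python) =====
-- def string_splosion(str):
--   result = ""
--   prefix = ""
--   for ch in str:
--     prefix += ch
--     result += prefix
--   return result
-- ===== Notes on version B (the rewrite author's own statement) =====
-- stated objective: alternative
-- what changed: B iterates over the characters themselves, maintaining a running prefix that grows by one character per step, instead of A's while loop over numeric indices that re-slices str[0:n] each iteration.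
import Mathlib
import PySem

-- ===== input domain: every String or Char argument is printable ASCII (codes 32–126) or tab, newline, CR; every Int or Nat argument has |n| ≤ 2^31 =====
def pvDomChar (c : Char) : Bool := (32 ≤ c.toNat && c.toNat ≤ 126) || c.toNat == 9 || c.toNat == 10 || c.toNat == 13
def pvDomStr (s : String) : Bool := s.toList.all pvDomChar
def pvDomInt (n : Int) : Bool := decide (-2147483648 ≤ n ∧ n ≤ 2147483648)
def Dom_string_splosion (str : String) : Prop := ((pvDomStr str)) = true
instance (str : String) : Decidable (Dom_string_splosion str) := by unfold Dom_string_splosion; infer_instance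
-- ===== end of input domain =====

-- B iterates over the characters with a running prefix grown one character per step,
-- instead of A's numeric-index while loop that re-slices str[0:n]; same cost, different state.

-- ===== PORT A =====
-- A: while n <= limit: s += str[0:n]; n += 1  — the counting loop is the fold over range(1, limit+1)
def string_splosion (str : String) : String :=
  let cs := str.toList
  let limit : Int := PySem.Str.len str
  String.ofList ((PySem.List.pyRange 1 (limit + 1) 1).foldl
    (fun s n => s ++ PySem.List.slice cs (some 0) (some n)) [])

-- ===== PORT B =====
-- B: for ch in str: prefix += ch; result += prefix
def string_splosion_alt (str : String) : String :=
  let pr := str.toList.foldl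
    (fun (pr : List Char × List Char) ch => (pr.1 ++ [ch], pr.2 ++ (pr.1 ++ [ch])))
    ([], [])
  String.ofList pr.2

-- ===== PRECONDITION & SPEC =====
def Spec_string_splosion (str : String) (out : String) : Prop := out = string_splosion_alt str
instance (str : String) (out : String) : Decidable (Spec_string_splosion str out) := by unfold Spec_string_splosion; infer_instance

-- ===== CLAIM (what is proved, stated in full; the proofs are below) =====
def Claim_equal_string_splosion : Prop := ∀ (str : String), Dom_string_splosion str → Spec_string_splosion str (string_splosion str)

-- ===== LEMMAS AND PROOFS =====

-- the common normal form: concatenation of the non-empty prefixes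
def pvPrefixCat (cs : List Char) : List Char :=
  (List.range cs.length).flatMap (fun k => cs.take (k + 1))

lemma pvA_fold (cs : List Char) :
    (PySem.List.pyRange 1 ((cs.length : Int) + 1) 1).foldl
      (fun s n => s ++ PySem.List.slice cs (some 0) (some n)) [] = pvPrefixCat cs := by
  unfold pvPrefixCat
  rw [show ((cs.length : Int) + 1) = (((cs.length + 1 : Nat) : Int)) by push_cast; ring,
      PySem.List.pyRange_one]
  rw [show ((cs.length + 1 : Nat) : Int) - 1 = ((cs.length : Nat) : Int) by push_cast; ring]
  simp only [Int.toNat_natCast, List.foldl_map]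
  rw [PySem.List.foldl_append_eq_flatMap]
  simp only [List.nil_append]
  apply List.flatMap_congr
  intro k hk
  simp only [List.mem_range] at hk
  rw [PySem.List.slice_zero_start, PySem.List.slice_to]
  · congr 1
    omega
  · omega

lemma pvA_eq (str : String) :
    string_splosion str = String.ofList (pvPrefixCat str.toList) := by
  unfold string_splosion
  simp only [PySem.Str.len_eq]
  rw [pvA_fold]

lemma pvB_fold (cs : List Char) :
    cs.foldl (fun (pr : List Char × List Char) ch => (pr.1 ++ [ch], pr.2 ++ (pr.1 ++ [ch]))) ([], [])
      = (cs, pvPrefixCat cs) := by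
  induction cs using List.reverseRecOn with
  | nil => simp [pvPrefixCat]
  | append_singleton cs c ih =>
    rw [List.foldl_append, ih]
    simp only [List.foldl_cons, List.foldl_nil]
    congr 1
    unfold pvPrefixCat
    rw [List.length_append, List.length_singleton, List.range_succ, List.flatMap_append,
        List.flatMap_singleton, List.take_of_length_le (by simp)]
    congr 1
    apply List.flatMap_congr
    intro k hk
    simp only [List.mem_range] at hk
    rw [List.take_append_of_le_length (by omega)]

lemma pvB_eq (str : String) :
    string_splosion_alt str = String.ofList (pvPrefixCat str.toList) := by
  unfold string_splosion_alt
  rw [pvB_fold]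

-- ===== VERDICT (by name: the statement is the Claim_ definition above) =====
theorem string_splosion_spec : Claim_equal_string_splosion := by
  intro str _
  unfold Spec_string_splosion
  rw [pvA_eq, pvB_eq]
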